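-- pv_equiv track=rewrite | github.com/crappslovinst/envault | envault/merge.py | merge_envs
-- ===== SOURCE A (Python) =====
-- from typing import Dict, Literal
--
-- MergeStrategy = Literal["ours", "theirs", "interactive"]
--
-- def merge_envs(
--     base: Dict[str, str],
--     incoming: Dict[str, str],
--     strategy: MergeStrategy = "theirs",
-- ) -> Dict[str, str]:
--     """Merge two env dicts using the given strategy.
--
--     - 'ours':   keep base values on conflict
--     - 'theirs': use incoming values on conflict
--     - 'interactive': raises NotImplementedError (handled at CLI layer)
--     """
--     if strategy == "interactive":
--         raise NotImplementedError(
--             "Interactive merge must be handled at the CLI layer."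
--         )
--
--     merged = dict(base)
--
--     for key, value in incoming.items():
--         if key not in merged:
--             merged[key] = value
--         else:
--             if strategy == "theirs":
--                 merged[key] = value
--             # strategy == "ours": keep existing, do nothing
--
--     return merged
-- ===== SOURCE B (Python) =====
-- def merge_envs(base, incoming, strategy="theirs"):
--     """Merge two env dicts using the given strategy (closed form, no mutation loop)."""
--     if strategy == "interactive":
--         raise NotImplementedError(
--             "Interactive merge must be handled at the CLI layer."
--         )
--     keys = list(base) + [k for k in incoming if k not in base]
--     if strategy == "theirs":
--         return {k: (incoming[k] if k in incoming else base[k]) for k in keys}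
--     return {k: (base[k] if k in base else incoming[k]) for k in keys}
-- ===== Notes on version B (the rewrite author's own statement) =====
-- stated objective: simpler
-- what changed: A mutates a copied dict with a per-key loop and a conflict branch; B computes the merged key order once (base keys, then incoming-only keys) and builds the result in a single comprehension that picks the winning value per key, with no dict mutation.
import Mathlib
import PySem

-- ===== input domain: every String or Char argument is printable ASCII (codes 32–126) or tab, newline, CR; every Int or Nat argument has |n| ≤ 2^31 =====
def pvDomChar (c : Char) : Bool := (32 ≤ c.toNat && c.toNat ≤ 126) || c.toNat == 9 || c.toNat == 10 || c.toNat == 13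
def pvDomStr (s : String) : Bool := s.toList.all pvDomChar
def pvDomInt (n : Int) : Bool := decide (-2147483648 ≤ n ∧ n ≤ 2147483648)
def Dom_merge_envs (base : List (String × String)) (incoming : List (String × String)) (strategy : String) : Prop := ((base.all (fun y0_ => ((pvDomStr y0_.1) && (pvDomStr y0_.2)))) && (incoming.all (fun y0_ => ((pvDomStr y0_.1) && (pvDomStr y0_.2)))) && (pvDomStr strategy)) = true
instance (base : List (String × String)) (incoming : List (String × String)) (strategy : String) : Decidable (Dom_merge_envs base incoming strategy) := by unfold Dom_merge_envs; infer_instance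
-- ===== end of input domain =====

-- B replaces A's per-key mutation loop by computing the merged key order once and building
-- the result with a single comprehension choosing the winning value per key (objective: simpler).

-- ===== PORT A =====
-- literal transliteration of A; 'strategy == "interactive"' raises NotImplementedError and is
-- excluded by Pre_merge_envs, so the port simply skips that branch.
def merge_envs (base : List (String × String)) (incoming : List (String × String)) (strategy : String) : List (String × String) :=
  let merged := PySem.Dict.ofList base                     -- merged = dict(base)
  let merged := (PySem.Dict.ofList incoming).items.foldl   -- for key, value in incoming.items():
    (fun m kv =>
      if !(m.contains kv.1) then m.insert kv.1 kv.2        -- if key not in merged: merged[key] = value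
      else if strategy == "theirs" then m.insert kv.1 kv.2 -- elif 'theirs': merged[key] = value
      else m)                                              -- 'ours': keep existing
    merged
  merged.items

-- ===== PORT B =====
-- transliteration of Source B: key order computed once, then one comprehension per strategy.
-- 'incoming[k]'/'base[k]' are ported as getD with an unreachable default: the guard of the
-- conditional expression guarantees k is a key of the dict being indexed, so this is exact.
def merge_envs_alt (base : List (String × String)) (incoming : List (String × String)) (strategy : String) : List (String × String) :=
  let b := PySem.Dict.ofList base
  let inc := PySem.Dict.ofList incoming
  let keys := b.keys ++ inc.keys.filter (fun k => !(b.contains k))   -- list(base) + [k for k in incoming if k not in base]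
  if strategy == "theirs" then
    keys.map (fun k => (k, if inc.contains k then inc.getD k "" else b.getD k ""))
  else
    keys.map (fun k => (k, if b.contains k then b.getD k "" else inc.getD k ""))

-- ===== PRECONDITION & SPEC =====
-- Pre_ excludes exactly strategy = "interactive", on which A (and B) raise NotImplementedError.
def Pre_merge_envs (base : List (String × String)) (incoming : List (String × String)) (strategy : String) : Prop :=
  strategy ≠ "interactive"
instance (base : List (String × String)) (incoming : List (String × String)) (strategy : String) : Decidable (Pre_merge_envs base incoming strategy) := by unfold Pre_merge_envs; infer_instance
def pvWitness_merge_envs : (List (String × String)) × (List (String × String)) × String :=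
  ([("A", "1"), ("B", "2")], [("B", "9"), ("C", "3")], "theirs")

def Spec_merge_envs (base : List (String × String)) (incoming : List (String × String)) (strategy : String) (out : List (String × String)) : Prop := out = merge_envs_alt base incoming strategy
instance (base : List (String × String)) (incoming : List (String × String)) (strategy : String) (out : List (String × String)) : Decidable (Spec_merge_envs base incoming strategy out) := by unfold Spec_merge_envs; infer_instance

-- ===== CLAIM (what is proved, stated in full; the proofs are below) =====
def Claim_equal_merge_envs : Prop := ∀ (base : List (String × String)) (incoming : List (String × String)) (strategy : String), Dom_merge_envs base incoming strategy → Pre_merge_envs base incoming strategy → Spec_merge_envs base incoming strategy (merge_envs base incoming strategy)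

-- ===== LEMMAS AND PROOFS =====

-- the 'theirs' loop: every incoming pair is inserted; the resulting items are the base items
-- with values overridden by incoming, followed by the incoming pairs with fresh keys.
theorem pv_foldl_insert_items (l : List (String × String)) (d : PySem.Dict String String)
    (hl : (l.map Prod.fst).Nodup) :
    (l.foldl (fun m kv => m.insert kv.1 kv.2) d).items
      = d.items.map (fun p => match (PySem.Dict.mk l).get? p.1 with
          | some v => (p.1, v)
          | none => p)
        ++ l.filter (fun kv => !(d.contains kv.1)) := by
  induction l generalizing d with
  | nil => simp [PySem.Dict.get?]
  | cons hd t ih =>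
    obtain ⟨k, v⟩ := hd
    simp only [List.map_cons, List.nodup_cons, List.mem_map] at hl
    obtain ⟨hk, hlt⟩ := hl
    have hknot : ∀ kv ∈ t, kv.1 ≠ k := fun kv hm he => hk ⟨kv, hm, he⟩
    rw [List.foldl_cons, ih _ hlt]
    have hfilter : t.filter (fun kv => !((d.insert k v).contains kv.1))
        = t.filter (fun kv => !(d.contains kv.1)) := by
      apply List.filter_congr
      intro kv hm
      have : (kv.1 == k) = false := by simp [hknot kv hm]
      simp [PySem.Dict.contains_insert, this]
    rw [hfilter]
    have hgetnone : (PySem.Dict.mk t).get? k = none := by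
      rw [PySem.Dict.get?_eq_none_iff_not_mem_keys]
      simp only [PySem.Dict.keys_mk]
      intro hmem
      rcases List.mem_map.mp hmem with ⟨kv, hm, he⟩
      exact hknot kv hm he
    by_cases hc : d.contains k = true
    · rw [PySem.Dict.items_insert_of_contains d v hc, List.map_map]
      have hfm : ∀ p ∈ d.items,
          ((fun p => match (PySem.Dict.mk t).get? p.1 with
              | some v => (p.1, v) | none => p) ∘
            (fun p => if (p.1 == k) = true then (k, v) else p)) p
          = (fun p => match (PySem.Dict.mk ((k, v) :: t)).get? p.1 with
              | some v => (p.1, v) | none => p) p := by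
        intro p hp
        by_cases hpk : (p.1 == k) = true
        · have hpk' : p.1 = k := by simpa using hpk
          simp [Function.comp, hpk, hpk', PySem.Dict.get?_mk_cons, hgetnone]
        · have hp1 : p.1 ≠ k := by simpa using hpk
          have hne : (k == p.1) = false := beq_eq_false_iff_ne.mpr (Ne.symm hp1)
          simp only [Function.comp_apply, if_neg hpk, PySem.Dict.get?_mk_cons, hne]
          rfl
      rw [List.map_congr_left hfm]
      have : ((k, v) :: t).filter (fun kv => !(d.contains kv.1))
          = t.filter (fun kv => !(d.contains kv.1)) := by
        simp [hc]
      rw [this]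
    · have hc' : d.contains k = false := by simpa using hc
      rw [PySem.Dict.items_insert_of_not_contains d v hc', List.map_append]
      have hfm : ∀ p ∈ d.items,
          (fun p => match (PySem.Dict.mk t).get? p.1 with
              | some v => (p.1, v) | none => p) p
          = (fun p => match (PySem.Dict.mk ((k, v) :: t)).get? p.1 with
              | some v => (p.1, v) | none => p) p := by
        intro p hp
        have hpk : p.1 ≠ k := by
          intro he
          have : d.contains k = true := by
            rw [PySem.Dict.contains_iff_mem_keys]
            exact he ▸ List.mem_map_of_mem hp
          simp [this] at hc'
        have hne : (k == p.1) = false := beq_eq_false_iff_ne.mpr (Ne.symm hpk)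
        simp only [PySem.Dict.get?_mk_cons, hne]
        rfl
      rw [List.map_congr_left hfm]
      have hflt : ((k, v) :: t).filter (fun kv => !(d.contains kv.1))
          = (k, v) :: t.filter (fun kv => !(d.contains kv.1)) := by
        simp [hc']
      rw [hflt, List.append_assoc]
      congr 1
      simp [hgetnone]

-- the 'ours' loop: only pairs with fresh keys are appended.
theorem pv_foldl_insert_new_items (l : List (String × String)) (d : PySem.Dict String String)
    (hl : (l.map Prod.fst).Nodup) :
    (l.foldl (fun m kv => if !(m.contains kv.1) then m.insert kv.1 kv.2 else m) d).items
      = d.items ++ l.filter (fun kv => !(d.contains kv.1)) := by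
  induction l generalizing d with
  | nil => simp
  | cons hd t ih =>
    obtain ⟨k, v⟩ := hd
    simp only [List.map_cons, List.nodup_cons, List.mem_map] at hl
    obtain ⟨hk, hlt⟩ := hl
    have hknot : ∀ kv ∈ t, kv.1 ≠ k := fun kv hm he => hk ⟨kv, hm, he⟩
    rw [List.foldl_cons]
    by_cases hc : d.contains k = true
    · rw [if_neg (by simp [hc] : ¬ ((!(d.contains k)) = true)), ih _ hlt]
      simp [hc]
    · have hc' : d.contains k = false := by simpa using hc
      rw [if_pos (by simp [hc'] : (!(d.contains k)) = true), ih _ hlt,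
        PySem.Dict.items_insert_of_not_contains d v hc']
      have hfilter : t.filter (fun kv => !((d.insert k v).contains kv.1))
          = t.filter (fun kv => !(d.contains kv.1)) := by
        apply List.filter_congr
        intro kv hm
        have : (kv.1 == k) = false := by simp [hknot kv hm]
        simp [PySem.Dict.contains_insert, this]
      rw [hfilter]
      simp [hc']

-- items of ofList have nodup first components
theorem pv_nodup_fst (xs : List (String × String)) :
    ((PySem.Dict.ofList xs).items.map Prod.fst).Nodup := by
  have := PySem.Dict.nodup_keys_ofList xs
  simpa [PySem.Dict.keys] using this

theorem merge_envs_spec : Claim_equal_merge_envs := by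
  intro base incoming strategy _ _
  unfold Spec_merge_envs merge_envs merge_envs_alt
  set b := PySem.Dict.ofList base with hb
  set inc := PySem.Dict.ofList incoming with hinc
  have hnb : b.keys.Nodup := PySem.Dict.nodup_keys_ofList base
  have hni : inc.keys.Nodup := PySem.Dict.nodup_keys_ofList incoming
  have hitems_b : b.items = b.keys.map (fun k => (k, b.getD k "")) :=
    PySem.Dict.items_eq_map_keys b hnb ""
  have hitems_i : inc.items = inc.keys.map (fun k => (k, inc.getD k "")) :=
    PySem.Dict.items_eq_map_keys inc hni ""
  -- the common tail: incoming pairs with fresh keys, as a map over filtered keys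
  have htail : ∀ (w : String → String × String),
      (∀ k ∈ inc.keys, !(b.contains k) → w k = (k, inc.getD k "")) →
      inc.items.filter (fun kv => !(b.contains kv.1))
        = (inc.keys.filter (fun k => !(b.contains k))).map w := by
    intro w hw
    rw [hitems_i, List.filter_map]
    have hcomp : ((fun kv => !(b.contains kv.1)) ∘
        (fun (k : String) => (k, inc.getD k "")))
        = fun k => !(b.contains k) := rfl
    rw [hcomp]
    apply List.map_congr_left
    intro k hkm
    rw [List.mem_filter] at hkm
    exact (hw k hkm.1 hkm.2).symm
  by_cases hth : (strategy == "theirs") = true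
  · -- 'theirs': the loop body is always an insert
    have hfn : (fun (m : PySem.Dict String String) (kv : String × String) =>
        if !(m.contains kv.1) then m.insert kv.1 kv.2
        else if strategy == "theirs" then m.insert kv.1 kv.2 else m)
        = fun m kv => m.insert kv.1 kv.2 := by
      funext m kv
      by_cases h : (m.contains kv.1) = true <;> simp [h, hth]
    rw [hfn, pv_foldl_insert_items inc.items b (pv_nodup_fst incoming), if_pos hth,
      List.map_append]
    congr 1
    · -- head part: base keys with overridden values
      rw [hitems_b, List.map_map]
      apply List.map_congr_left
      intro k hkm
      have hmk : PySem.Dict.mk inc.items = inc := rfl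
      cases hv : inc.get? k with
      | some v =>
        have hcont : inc.contains k = true := by
          rw [PySem.Dict.contains_eq_isSome_get?, hv]; rfl
        have hgd : inc.getD k "" = v := PySem.Dict.getD_of_get?_eq_some _ _ hv
        simp [Function.comp, hmk, hv, hcont, hgd]
      | none =>
        have hcont : inc.contains k = false := by
          rw [PySem.Dict.contains_eq_isSome_get?, hv]; rfl
        simp [Function.comp, hmk, hv, hcont]
    · -- tail part
      exact htail _ (fun k hkm _ => by
        have : inc.contains k = true := (PySem.Dict.contains_iff_mem_keys inc k).mpr hkm
        simp [this])
  · -- 'ours' (any strategy other than "theirs"): keep existing on conflict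
    have hfn : (fun (m : PySem.Dict String String) (kv : String × String) =>
        if !(m.contains kv.1) then m.insert kv.1 kv.2
        else if strategy == "theirs" then m.insert kv.1 kv.2 else m)
        = fun m kv => if !(m.contains kv.1) then m.insert kv.1 kv.2 else m := by
      funext m kv
      by_cases h : (m.contains kv.1) = true <;> simp [h, hth]
    rw [hfn, pv_foldl_insert_new_items inc.items b (pv_nodup_fst incoming), if_neg hth,
      List.map_append]
    congr 1
    · -- head part: base items unchanged
      rw [hitems_b]
      apply List.map_congr_left
      intro k hkm
      have : b.contains k = true := (PySem.Dict.contains_iff_mem_keys b k).mpr hkm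
      simp [this]
    · exact htail _ (fun k hkm hfb => by
        have hbc : b.contains k = false := by simpa using hfb
        simp [hbc])
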